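-- pv_equiv track=rewrite | github.com/s-brisson/pynoddy_exhumation | exh_processing.py | first_unique_vals
-- ===== SOURCE A (Python) =====
-- def first_unique_vals(array):
--     unique_vals = set()  # initialize an empty set to store unique non-zero values
--     first_unique_val = None
--     for i in array:
--         if i != 0:
--             if i not in unique_vals:
--                 unique_vals.add(i)
--                 if first_unique_val is None:
--                     first_unique_val = i
--                 else:
--                     return first_unique_val, i
--     return None
-- ===== SOURCE B (Python) =====
-- def first_unique_vals(array):
--     it = iter(array)
--     for first in it:
--         if first != 0:
--             break
--     else:
--         return None
--     for i in it:
--         if i != 0 and i != first: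
--             return first, i
--     return None
-- ===== Notes on version B (the rewrite author's own statement) =====
-- stated objective: simpler
-- what changed: Replaces the one stateful scan with a set and an Option accumulator by two sequential iterator phases keeping only the scalar 'first': skip to the first non-zero value, then return at the first later non-zero value different from it; the set disappears because it can only ever hold that first value when the return fires.
import Mathlib
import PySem

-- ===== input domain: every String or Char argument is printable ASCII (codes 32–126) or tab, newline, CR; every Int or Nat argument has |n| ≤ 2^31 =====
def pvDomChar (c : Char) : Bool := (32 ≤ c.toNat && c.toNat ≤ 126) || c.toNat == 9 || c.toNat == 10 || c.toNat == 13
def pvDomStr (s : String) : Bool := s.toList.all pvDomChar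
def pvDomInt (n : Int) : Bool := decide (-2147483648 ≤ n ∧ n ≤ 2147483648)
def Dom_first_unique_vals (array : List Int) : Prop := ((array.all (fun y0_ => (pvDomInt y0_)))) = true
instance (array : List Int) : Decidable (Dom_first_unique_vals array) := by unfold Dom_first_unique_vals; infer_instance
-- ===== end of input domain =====

-- B replaces A's single stateful scan (set + Option accumulator) by two sequential phases
-- keeping only the scalar 'first'; objective: simpler.

-- ===== PORT A =====
-- the for-loop of A, carrying the set 'unique_vals' and 'first_unique_val'
def fuvA_loop : List Int → PySem.Set Int → Option Int → Option (Int × Int)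
  | [], _, _ => none
  | i :: rest, uv, fu =>
      if i ≠ 0 then
        if i ∈ uv then fuvA_loop rest uv fu
        else
          match fu with
          | none => fuvA_loop rest (PySem.Set.add uv i) (some i)
          | some f => some (f, i)
      else fuvA_loop rest uv fu

def first_unique_vals (array : List Int) : Option (Int × Int) :=
  fuvA_loop array PySem.Set.empty none

-- ===== PORT B =====
-- phase 1: skip until the first non-zero value; return it with the unconsumed remainder
def fuvB_find : List Int → Option (Int × List Int)
  | [] => none
  | x :: rest => if x ≠ 0 then some (x, rest) else fuvB_find rest

-- phase 2: first later non-zero value different from 'first'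
def fuvB_second (first : Int) : List Int → Option (Int × Int)
  | [] => none
  | i :: rest => if i ≠ 0 ∧ i ≠ first then some (first, i) else fuvB_second first rest

def first_unique_vals_alt (array : List Int) : Option (Int × Int) :=
  match fuvB_find array with
  | none => none
  | some (first, rest) => fuvB_second first rest

-- ===== PRECONDITION & SPEC =====
def Spec_first_unique_vals (array : List Int) (out : Option (Int × Int)) : Prop := out = first_unique_vals_alt array
instance (array : List Int) (out : Option (Int × Int)) : Decidable (Spec_first_unique_vals array out) := by unfold Spec_first_unique_vals; infer_instance

-- ===== CLAIM (what is proved, stated in full; the proofs are below) =====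
def Claim_equal_first_unique_vals : Prop := ∀ (array : List Int), Dom_first_unique_vals array → Spec_first_unique_vals array (first_unique_vals array)

-- ===== LEMMAS AND PROOFS =====

-- once 'first' is bound, the set holds exactly 'first', and A's tail behaves like phase 2
theorem fuvA_loop_some (rest : List Int) : ∀ (f : Int) (uv : PySem.Set Int),
    (∀ x : Int, x ∈ uv ↔ x = f) → fuvA_loop rest uv (some f) = fuvB_second f rest := by
  induction rest with
  | nil => intro f uv _; rfl
  | cons i rest ih =>
    intro f uv h
    simp only [fuvA_loop, fuvB_second]
    by_cases hi : i = 0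
    · simp [hi, ih f uv h]
    · by_cases hf : i = f
      · simp [hf, (h f).mpr rfl, ih f uv h]
      · have : i ∉ uv := fun hm => hf ((h i).mp hm)
        simp [hi, hf, this]

theorem fuvA_eq_alt (array : List Int) :
    fuvA_loop array PySem.Set.empty none = first_unique_vals_alt array := by
  induction array with
  | nil => rfl
  | cons i rest ih =>
    simp only [fuvA_loop, first_unique_vals_alt, fuvB_find]
    by_cases hi : i = 0
    · simpa [hi, first_unique_vals_alt] using ih
    · have hmem : ∀ x : Int, x ∈ PySem.Set.add PySem.Set.empty i ↔ x = i := by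
        intro x; simp [PySem.Set.add, PySem.Set.empty]
      rw [if_pos hi, if_neg (by simp [PySem.Set.empty]), if_pos hi]
      exact fuvA_loop_some rest i _ hmem

-- ===== VERDICT (by name: the statement is the Claim_ definition above) =====
theorem first_unique_vals_spec : Claim_equal_first_unique_vals := by
  intro array _
  unfold Spec_first_unique_vals first_unique_vals
  exact fuvA_eq_alt array
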